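-- pv_equiv track=rewrite | github.com/asigalov61/tegridy-tools | tegridy-tools/TCUPY.py | bpe_encode
-- ===== SOURCE A (Python) =====
-- def bpe_encode(seq, codes):
--     """
--     Iteratively encodes a sequence using BPE merge rules provided in a dictionary.
--
--     Args:
--         seq (list): A list of tokens (e.g. integers) representing the input sequence.
--         codes (dict): A dictionary mapping token pairs (a tuple of two tokens)
--                       to a merged token. For example:
--                       { (1, 2): 100, (100, 3): 101 }
--
--     Returns:
--         list: The encoded sequence after applying all possible merges.
--
--     The function repeatedly scans the entire sequence from left to right;
--     whenever it finds a contiguous token pair that exists as a key in the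
--     codes dict, it replaces that pair with the merged token. This pass is
--     repeated until no more merges are possible.
--     """
--
--     if type(codes) == list:
--         codes = dict(codes)
--
--     encoded_seq = seq.copy()  # work on a copy so as not to modify the original
--     done = False
--     while not done:
--         new_seq = []
--         i = 0
--         changed = False
--         while i < len(encoded_seq):
--             # If a merge is possible, merge the two tokens.
--             if i < len(encoded_seq) - 1 and (encoded_seq[i], encoded_seq[i + 1]) in codes:
--                 new_seq.append(codes[(encoded_seq[i], encoded_seq[i + 1])])
--                 i += 2  # Skip the next token as it was merged.
--                 changed = True
--             else:
--                 new_seq.append(encoded_seq[i])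
--                 i += 1
--         # If no merges occurred in this pass, exit the loop.
--         if not changed:
--             done = True
--         encoded_seq = new_seq
--     return encoded_seq
-- ===== SOURCE B (Python) =====
-- def bpe_encode(seq, codes):
--     """Mark-select-stitch BPE: per round, precompute the hit bitmap of mergeable
--     pairs, pick the merge positions arithmetically (every other hit within each
--     maximal run of consecutive hits), then stitch the new sequence from slices.
--     Rounds repeat until no position is selected."""
--     if type(codes) == list:
--         codes = dict(codes)
--     cur = list(seq)
--     while True:
--         hits = [p in codes for p in zip(cur, cur[1:])]
--         sel = []
--         run = -1
--         for i, h in enumerate(hits):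
--             if h:
--                 if run < 0:
--                     run = i
--                 if (i - run) % 2 == 0:
--                     sel.append(i)
--             else:
--                 run = -1
--         if not sel:
--             return cur
--         out = []
--         prev = 0
--         for i in sel:
--             out.extend(cur[prev:i])
--             out.append(codes[(cur[i], cur[i + 1])])
--             prev = i + 2
--         out.extend(cur[prev:])
--         cur = out
-- ===== Notes on version B (the rewrite author's own statement) =====
-- stated objective: alternative
-- what changed: Each round is computed in three independent stages instead of A's online indexed scan: precompute the bitmap of mergeable pairs from zip(cur, cur[1:]), select the merge positions arithmetically as every other hit within each maximal run of consecutive hits, then stitch the new sequence from slices between the selected positions; rounds stop when the selection is empty.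
import Mathlib
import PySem

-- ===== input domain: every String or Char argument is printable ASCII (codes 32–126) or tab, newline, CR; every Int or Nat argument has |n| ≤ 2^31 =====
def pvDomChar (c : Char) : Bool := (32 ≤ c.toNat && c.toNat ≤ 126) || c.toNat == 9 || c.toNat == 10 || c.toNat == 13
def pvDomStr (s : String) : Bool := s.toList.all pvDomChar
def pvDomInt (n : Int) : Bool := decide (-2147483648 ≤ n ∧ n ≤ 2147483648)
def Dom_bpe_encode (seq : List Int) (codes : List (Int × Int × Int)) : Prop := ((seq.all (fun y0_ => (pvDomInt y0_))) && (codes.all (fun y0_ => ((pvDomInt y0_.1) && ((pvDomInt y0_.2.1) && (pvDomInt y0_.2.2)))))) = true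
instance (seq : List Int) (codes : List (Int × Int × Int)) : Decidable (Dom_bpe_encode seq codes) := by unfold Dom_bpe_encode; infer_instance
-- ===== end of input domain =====

-- B recomputes each merge round in three stages (hit bitmap from zipped pairs,
-- arithmetic run-parity selection of merge positions, slice stitching) instead of
-- A's online indexed scan; same return value, no argument is mutated.

-- shared helper: both Pythons run `codes = dict(codes)` and look pairs up in it
def pvCodes (codes : List (Int × Int × Int)) : PySem.Dict (Int × Int) Int :=
  PySem.Dict.ofList (codes.map (fun t => ((t.1, t.2.1), t.2.2)))

def pvCodeGet (codes : List (Int × Int × Int)) (x y : Int) : Option Int :=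
  (pvCodes codes).get? (x, y)

-- ===== PORT A =====
-- inner `while i < len(encoded_seq)` loop of A, building new_seq by appending
def pvPassA (codes : List (Int × Int × Int)) (xs : List Int) (i : Nat)
    (newSeq : List Int) (changed : Bool) : List Int × Bool :=
  if i < xs.length then
    if i + 1 < xs.length then
      match pvCodeGet codes (xs.getD i 0) (xs.getD (i + 1) 0) with
      | some v => pvPassA codes xs (i + 2) (newSeq ++ [v]) true
      | none => pvPassA codes xs (i + 1) (newSeq ++ [xs.getD i 0]) changed
    else pvPassA codes xs (i + 1) (newSeq ++ [xs.getD i 0]) changed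
  else (newSeq, changed)
termination_by xs.length - i

-- outer `while not done` loop of A; the fuel only bounds the number of passes
-- (each changed pass strictly shortens the list, so seq.length + 1 passes always suffice)
def pvLoopA (codes : List (Int × Int × Int)) : Nat → List Int → List Int
  | 0, xs => xs
  | f + 1, xs =>
      let r := pvPassA codes xs 0 [] false
      if r.2 then pvLoopA codes f r.1 else r.1

def bpe_encode (seq : List Int) (codes : List (Int × Int × Int)) : List Int :=
  pvLoopA codes (seq.length + 1) seq

-- ===== PORT B =====
-- stage 1: `hits = [p in codes for p in zip(cur, cur[1:])]`
def pvHits (codes : List (Int × Int × Int)) (cur : List Int) : List Bool :=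
  (cur.zip (PySem.List.slice cur (some 1) none)).map
    (fun p => (pvCodeGet codes p.1 p.2).isSome)

-- stage 2: one step of the `for i, h in enumerate(hits)` selection loop; state = (run, sel)
def pvSelStep (st : Int × List Int) (ih : Int × Bool) : Int × List Int :=
  if ih.2 then
    let run := if st.1 < 0 then ih.1 else st.1
    if PySem.Int.mod (ih.1 - run) 2 == 0 then (run, st.2 ++ [ih.1]) else (run, st.2)
  else (-1, st.2)

def pvSel (codes : List (Int × Int × Int)) (cur : List Int) : List Int :=
  ((PySem.List.enumerate (pvHits codes cur) 0).foldl pvSelStep (-1, [])).2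

-- stage 3: one step of the `for i in sel` stitch loop; state = (out, prev);
-- every selected i has i and i+1 in range, so pyGetD with default 0 is exact there
def pvStitchStep (codes : List (Int × Int × Int)) (cur : List Int)
    (st : List Int × Int) (i : Int) : List Int × Int :=
  (st.1 ++ PySem.List.slice cur (some st.2) (some i) ++
      [(pvCodeGet codes (PySem.List.pyGetD cur i 0) (PySem.List.pyGetD cur (i + 1) 0)).getD 0],
   i + 2)

def pvRebuild (codes : List (Int × Int × Int)) (cur : List Int) (sel : List Int) : List Int :=
  let r := sel.foldl (pvStitchStep codes cur) ([], 0)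
  r.1 ++ PySem.List.slice cur (some r.2) none

-- B's `while True` round loop; same totality fuel as A's port
def pvLoopB (codes : List (Int × Int × Int)) : Nat → List Int → List Int
  | 0, cur => cur
  | f + 1, cur =>
      let sel := pvSel codes cur
      if sel.isEmpty then cur else pvLoopB codes f (pvRebuild codes cur sel)

def bpe_encode_alt (seq : List Int) (codes : List (Int × Int × Int)) : List Int :=
  pvLoopB codes (seq.length + 1) seq

-- ===== PRECONDITION & SPEC =====
def Spec_bpe_encode (seq : List Int) (codes : List (Int × Int × Int)) (out : List Int) : Prop := out = bpe_encode_alt seq codes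
instance (seq : List Int) (codes : List (Int × Int × Int)) (out : List Int) : Decidable (Spec_bpe_encode seq codes out) := by unfold Spec_bpe_encode; infer_instance

-- ===== CLAIM (what is proved, stated in full; the proofs are below) =====
def Claim_equal_bpe_encode : Prop := ∀ (seq : List Int) (codes : List (Int × Int × Int)), Dom_bpe_encode seq codes → Spec_bpe_encode seq codes (bpe_encode seq codes)

-- ===== LEMMAS AND PROOFS =====

-- reference shape of one greedy merge pass (used to relate both ports)
def pvPassSpec (codes : List (Int × Int × Int)) : List Int → List Int × Bool
  | [] => ([], false)
  | [x] => ([x], false)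
  | x :: y :: rest =>
      match pvCodeGet codes x y with
      | some v => (v :: (pvPassSpec codes rest).1, true)
      | none =>
          let r := pvPassSpec codes (y :: rest)
          (x :: r.1, r.2)

theorem pvPassA_eq_spec (codes : List (Int × Int × Int)) (xs : List Int) (i : Nat)
    (acc : List Int) (ch : Bool) :
    pvPassA codes xs i acc ch =
      (acc ++ (pvPassSpec codes (xs.drop i)).1, ch || (pvPassSpec codes (xs.drop i)).2) := by
  fun_induction pvPassA codes xs i acc ch with
  | case1 i acc ch h1 h2 v hv ih =>
      rw [List.drop_eq_getElem_cons h1, List.drop_eq_getElem_cons h2, ih]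
      simp only [List.getD_eq_getElem _ _ h1, List.getD_eq_getElem _ _ h2] at hv
      simp [pvPassSpec, hv, List.append_assoc]
  | case2 i acc ch h1 h2 hv ih =>
      rw [ih, List.drop_eq_getElem_cons h1, List.drop_eq_getElem_cons h2]
      simp only [List.getD_eq_getElem _ _ h1, List.getD_eq_getElem _ _ h2] at hv
      simp [pvPassSpec, hv, List.append_assoc, List.getElem?_eq_getElem h1]
  | case3 i acc ch h1 h2 ih =>
      have hd : xs.drop (i + 1) = [] := List.drop_eq_nil_of_le (by omega)
      rw [ih, hd, List.drop_eq_getElem_cons h1, hd]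
      simp [pvPassSpec, List.getElem?_eq_getElem h1]
  | case4 i acc ch h1 =>
      have hd : xs.drop i = [] := List.drop_eq_nil_of_le (by omega)
      simp [hd, pvPassSpec]

-- unchanged pass is the identity
theorem pvPassSpec_fix (codes : List (Int × Int × Int)) (cur : List Int)
    (h : (pvPassSpec codes cur).2 = false) : (pvPassSpec codes cur).1 = cur := by
  induction cur using pvPassSpec.induct codes with
  | case1 => rfl
  | case2 x => rfl
  | case3 x y rest v hv ih => simp [pvPassSpec, hv] at h
  | case4 x y rest hv ih =>
      simp only [pvPassSpec, hv] at h ⊢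
      simp [ih h]

-- Nat-indexed recursive characterisation of the run-parity selection
def pvSelN : Nat → Bool → List Bool → List Nat
  | _, _, [] => []
  | i, prev, h :: t => if h && !prev then i :: pvSelN (i + 1) true t else pvSelN (i + 1) false t

def pvCast (S : List Nat) : List Int := S.map (fun n => (n : Int))
def pvCast1 (S : List Nat) : List Int := S.map (fun n => (n : Int) + 1)

theorem pvCast_nil : pvCast [] = [] := rfl
theorem pvCast_cons (n : Nat) (S : List Nat) : pvCast (n :: S) = (n : Int) :: pvCast S := rfl
theorem pvCast1_nil : pvCast1 [] = [] := rfl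
theorem pvCast1_cons (n : Nat) (S : List Nat) : pvCast1 (n :: S) = ((n : Int) + 1) :: pvCast1 S := rfl

theorem pvCast_map_succ (S : List Nat) : pvCast (S.map (· + 1)) = pvCast1 S := by
  induction S with
  | nil => rfl
  | cons n S ih =>
      simp only [List.map_cons, pvCast_cons, pvCast1_cons, ih]
      push_cast; ring_nf

theorem pvSelN_shift (l : List Bool) : ∀ (i : Nat) (prev : Bool),
    pvSelN (i + 1) prev l = (pvSelN i prev l).map (· + 1) := by
  induction l with
  | nil => intro i prev; rfl
  | cons h t ih =>
      intro i prev
      simp only [pvSelN]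
      by_cases hp : (h && !prev) = true <;> simp [hp, ih]

-- the selection fold computes pvSelN (invariant: prev-selected ↔ run ≥ 0 and (j - run) odd)
theorem pvSel_fold (hits : List Bool) : ∀ (j : Nat) (run : Int) (sel : List Int),
    ((PySem.List.enumerate hits (j : Int)).foldl pvSelStep (run, sel)).2 =
      sel ++ pvCast (pvSelN j (decide (0 ≤ run ∧ ((j : Int) - run) % 2 = 1)) hits) := by
  induction hits with
  | nil => intro j run sel; simp [pvSelN, pvCast]
  | cons h t ih =>
      intro j run sel
      rw [PySem.List.enumerate_cons]
      simp only [List.foldl_cons]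
      have hj1 : ((j : Int) + 1) = (((j + 1 : Nat) : Int)) := by push_cast; ring
      by_cases hh : h = true
      · subst hh
        by_cases hr : run < 0
        · have hm0 : PySem.Int.mod ((j : Int) - (j : Int)) 2 = 0 := by
            rw [PySem.Int.mod_eq_emod_of_pos (by norm_num)]; omega
          have hstep : pvSelStep (run, sel) ((j : Int), true) = ((j : Int), sel ++ [(j : Int)]) := by
            simp [pvSelStep, hr]
          rw [hstep, hj1, ih]
          have h1 : decide (0 ≤ run ∧ ((j : Int) - run) % 2 = 1) = false := by
            simp only [decide_eq_false_iff_not]; rintro ⟨h01, _⟩; omega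
          have h2 : decide (0 ≤ (j : Int) ∧ (((j + 1 : Nat) : Int) - (j : Int)) % 2 = 1) = true := by
            simp only [decide_eq_true_eq]; push_cast; omega
          rw [h1, h2]
          simp [pvSelN, pvCast]
        · have hm : PySem.Int.mod ((j : Int) - run) 2 = ((j : Int) - run) % 2 :=
            PySem.Int.mod_eq_emod_of_pos (by norm_num)
          by_cases he : ((j : Int) - run) % 2 = 0
          · have hstep : pvSelStep (run, sel) ((j : Int), true) = (run, sel ++ [(j : Int)]) := by
              simp [pvSelStep, hr, he]
            rw [hstep, hj1, ih]
            have h1 : decide (0 ≤ run ∧ ((j : Int) - run) % 2 = 1) = false := by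
              simp only [decide_eq_false_iff_not]; rintro ⟨_, h02⟩; omega
            have h2 : decide (0 ≤ run ∧ (((j + 1 : Nat) : Int) - run) % 2 = 1) = true := by
              simp only [decide_eq_true_eq]; push_cast; omega
            rw [h1, h2]
            simp [pvSelN, pvCast]
          · have he1 : ((j : Int) - run) % 2 = 1 := by omega
            have hstep : pvSelStep (run, sel) ((j : Int), true) = (run, sel) := by
              simp [pvSelStep, hr, he1]
            rw [hstep, hj1, ih]
            have h1 : decide (0 ≤ run ∧ ((j : Int) - run) % 2 = 1) = true := by
              simp only [decide_eq_true_eq]; exact ⟨by omega, he1⟩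
            have h2 : decide (0 ≤ run ∧ (((j + 1 : Nat) : Int) - run) % 2 = 1) = false := by
              simp only [decide_eq_false_iff_not]; rintro ⟨_, h02⟩; push_cast at h02; omega
            rw [h1, h2]
            simp [pvSelN]
      · have hh' : h = false := by simpa using hh
        subst hh'
        have hstep : pvSelStep (run, sel) ((j : Int), false) = (-1, sel) := by
          simp [pvSelStep]
        rw [hstep, hj1, ih]
        have h1 : decide (0 ≤ (-1 : Int) ∧ (((j + 1 : Nat) : Int) - (-1)) % 2 = 1) = false := by
          simp only [decide_eq_false_iff_not]; rintro ⟨h01, _⟩; omega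
        rw [h1]
        simp [pvSelN]

-- structural view of the hit bitmap
theorem pvHits_nil (codes : List (Int × Int × Int)) : pvHits codes [] = [] := rfl

theorem pvHits_single (codes : List (Int × Int × Int)) (x : Int) : pvHits codes [x] = [] := by
  simp [pvHits, PySem.List.slice_from_one]

theorem pvHits_cons (codes : List (Int × Int × Int)) (x y : Int) (t : List Int) :
    pvHits codes (x :: y :: t) =
      (pvCodeGet codes x y).isSome :: pvHits codes (y :: t) := by
  simp [pvHits, PySem.List.slice_from_one]

-- the .2 component of the stitch fold depends only on the index list
def pvLastPos : List Int → Int → Int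
  | [], q => q
  | i :: I, _ => pvLastPos I (i + 2)

def pvLastPos' : List Nat → Nat → Nat
  | [], p => p
  | n :: S, _ => pvLastPos' S (n + 2)

theorem pvStitch_snd (codes : List (Int × Int × Int)) (cur : List Int) (I : List Int) :
    ∀ (out : List Int) (q : Int),
      (I.foldl (pvStitchStep codes cur) (out, q)).2 = pvLastPos I q := by
  induction I with
  | nil => intro out q; rfl
  | cons i I ih => intro out q; simp only [List.foldl_cons, pvStitchStep, pvLastPos]; exact ih _ _

theorem pvLastPos_cast (S : List Nat) : ∀ (p : Nat),
    pvLastPos (pvCast S) (p : Int) = ((pvLastPos' S p : Nat) : Int) := by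
  induction S with
  | nil => intro p; rfl
  | cons n S ih =>
      intro p
      simp only [pvCast_cons, pvLastPos, pvLastPos']
      have h2 : ((n : Int) + 2) = (((n + 2 : Nat) : Int)) := by push_cast; ring
      rw [h2, ih]

theorem pvLastPos_cast1 (S : List Nat) : ∀ (p : Nat),
    pvLastPos (pvCast1 S) ((p : Int) + 1) = ((pvLastPos' S p : Nat) : Int) + 1 := by
  induction S with
  | nil => intro p; rfl
  | cons n S ih =>
      intro p
      simp only [pvCast1_cons, pvLastPos, pvLastPos']
      have h2 : ((n : Int) + 1 + 2) = (((n + 2 : Nat) : Int) + 1) := by push_cast; ring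
      rw [h2, ih]

theorem pvLastPos'_shift (S : List Nat) : ∀ (p : Nat),
    pvLastPos' (S.map (· + 1)) (p + 1) = pvLastPos' S p + 1 := by
  induction S with
  | nil => intro p; rfl
  | cons n S ih => intro p; simp only [List.map_cons, pvLastPos']; exact ih (n + 2)

-- the out accumulator factors out of the stitch fold
theorem pvStitch_out (codes : List (Int × Int × Int)) (cur : List Int) (I : List Int) :
    ∀ (out : List Int) (q : Int),
      (I.foldl (pvStitchStep codes cur) (out, q)).1 =
        out ++ (I.foldl (pvStitchStep codes cur) ([], q)).1 := by
  induction I with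
  | nil => intro out q; simp
  | cons i I ih =>
      intro out q
      simp only [List.foldl_cons, pvStitchStep]
      conv_lhs => rw [ih]
      conv_rhs => rw [ih]
      simp [List.append_assoc]

-- slice and token lookups shift across a cons
theorem pvSlice_cons_shift (x : Int) (t : List Int) (p n : Nat) :
    PySem.List.slice (x :: t) (some ((p : Int) + 1)) (some ((n : Int) + 1)) =
      PySem.List.slice t (some (p : Int)) (some (n : Int)) := by
  have hp : ((p : Int) + 1) = (((p + 1 : Nat) : Int)) := by push_cast; ring
  have hn : ((n : Int) + 1) = (((n + 1 : Nat) : Int)) := by push_cast; ring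
  rw [hp, hn, PySem.List.slice_natCast, PySem.List.slice_natCast]
  simp [Nat.succ_sub_succ]

theorem pvTok_cons_shift (codes : List (Int × Int × Int)) (x : Int) (t : List Int) (n : Nat) :
    (pvCodeGet codes (PySem.List.pyGetD (x :: t) ((n : Int) + 1) 0)
        (PySem.List.pyGetD (x :: t) ((n : Int) + 1 + 1) 0)).getD 0 =
      (pvCodeGet codes (PySem.List.pyGetD t (n : Int) 0)
        (PySem.List.pyGetD t ((n : Int) + 1) 0)).getD 0 := by
  have h1 : ((n : Int) + 1) = (((n + 1 : Nat) : Int)) := by push_cast; ring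
  have h2 : ((n : Int) + 1 + 1) = (((n + 2 : Nat) : Int)) := by push_cast; ring
  rw [h2, h1]
  simp only [PySem.List.pyGetD_natCast]
  simp

-- shift the whole stitch fold one position to the left
theorem pvStitch_shift (codes : List (Int × Int × Int)) (x : Int) (t : List Int)
    (S : List Nat) : ∀ (p : Nat),
    ((pvCast1 S).foldl (pvStitchStep codes (x :: t)) ([], (p : Int) + 1)).1 =
      ((pvCast S).foldl (pvStitchStep codes t) ([], (p : Int))).1 := by
  induction S with
  | nil => intro p; rfl
  | cons n S ih =>
      intro p
      simp only [pvCast1_cons, pvCast_cons, List.foldl_cons, pvStitchStep]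
      rw [pvStitch_out, pvStitch_out codes t]
      rw [pvSlice_cons_shift, pvTok_cons_shift]
      have h3 : ((n : Int) + 1 + 2) = (((n + 2 : Nat) : Int) + 1) := by push_cast; ring
      have h4 : ((n : Int) + 2) = (((n + 2 : Nat) : Int)) := by push_cast; ring
      rw [h3, h4, ih (n + 2)]

-- rebuild with all indices shifted by one on a cons keeps the head
theorem pvRebuild_shift (codes : List (Int × Int × Int)) (x : Int) (t : List Int)
    (S : List Nat) :
    pvRebuild codes (x :: t) (pvCast1 S) = x :: pvRebuild codes t (pvCast S) := by
  cases S with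
  | nil =>
      simp [pvRebuild, pvCast1_nil, pvCast_nil, PySem.List.slice_none_none]
  | cons n S =>
      unfold pvRebuild
      simp only [pvCast1_cons, pvCast_cons, List.foldl_cons, pvStitchStep, List.nil_append]
      rw [pvStitch_out, pvStitch_out codes t]
      rw [pvStitch_snd, pvStitch_snd]
      have h3 : ((n : Int) + 1 + 2) = (((n + 2 : Nat) : Int) + 1) := by push_cast; ring
      have h4 : ((n : Int) + 2) = (((n + 2 : Nat) : Int)) := by push_cast; ring
      rw [h3, h4, pvLastPos_cast1, pvLastPos_cast, pvStitch_shift]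
      -- first slice: (x::t)[0:(n+1)] = x :: t[0:n]
      have hslice0 : PySem.List.slice (x :: t) (some 0) (some ((n : Int) + 1)) =
          x :: PySem.List.slice t (some 0) (some (n : Int)) := by
        have hb1 : (0 : Int) ≤ (n : Int) + 1 := by positivity
        rw [PySem.List.slice_zero_start, PySem.List.slice_zero_start,
          PySem.List.slice_to _ hb1, PySem.List.slice_to _ (Int.natCast_nonneg n)]
        have ht : ((n : Int) + 1).toNat = n + 1 := by omega
        simp [ht]
      have htok : (pvCodeGet codes (PySem.List.pyGetD (x :: t) ((n : Int) + 1) 0)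
          (PySem.List.pyGetD (x :: t) ((n : Int) + 1 + 1) 0)).getD 0 =
          (pvCodeGet codes (PySem.List.pyGetD t (n : Int) 0)
            (PySem.List.pyGetD t ((n : Int) + 1) 0)).getD 0 := pvTok_cons_shift codes x t n
      have hsliceL : PySem.List.slice (x :: t) (some (((pvLastPos' S (n + 2) : Nat) : Int) + 1)) none =
          PySem.List.slice t (some ((pvLastPos' S (n + 2) : Nat) : Int)) none := by
        have hL : (((pvLastPos' S (n + 2) : Nat) : Int) + 1) = (((pvLastPos' S (n + 2) + 1 : Nat) : Int)) := by
          push_cast; ring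
        rw [hL, PySem.List.slice_from_natCast, PySem.List.slice_from_natCast]
        simp
      rw [hslice0, htok, hsliceL]
      simp [List.append_assoc]

-- rebuild when position 0 is selected: emit the merged token, continue two to the right
theorem pvRebuild_merge0 (codes : List (Int × Int × Int)) (x y : Int) (t : List Int)
    (v : Int) (hv : pvCodeGet codes x y = some v) (S : List Nat) :
    pvRebuild codes (x :: y :: t) ((0 : Int) :: pvCast (S.map (· + 2))) =
      v :: pvRebuild codes t (pvCast S) := by
  unfold pvRebuild
  simp only [List.foldl_cons, pvStitchStep, List.nil_append]
  have hsl0 : PySem.List.slice (x :: y :: t) (some (0 : Int)) (some (0 : Int)) = [] := by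
    rw [show (0 : Int) = ((0 : Nat) : Int) from rfl, PySem.List.slice_natCast]
    simp
  have htok0 : (pvCodeGet codes (PySem.List.pyGetD (x :: y :: t) (0 : Int) 0)
      (PySem.List.pyGetD (x :: y :: t) ((0 : Int) + 1) 0)).getD 0 = v := by
    rw [show ((0 : Int) + 1) = ((1 : Nat) : Int) by norm_num]
    simp only [PySem.List.pyGetD_zero, PySem.List.pyGetD_natCast]
    simp [hv]
  have hcast : pvCast (S.map (· + 2)) = pvCast1 (S.map (· + 1)) := by
    have h : S.map (· + 2) = (S.map (· + 1)).map (· + 1) := by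
      simp only [List.map_map]
      apply List.map_congr_left; intro a _; simp
    rw [h, pvCast_map_succ]
  rw [hsl0, htok0, hcast]
  rw [pvStitch_out, pvStitch_out codes t]
  rw [pvStitch_snd, pvStitch_snd]
  rw [show ((0 : Int) + 2) = ((1 : Nat) : Int) + 1 by norm_num]
  rw [pvStitch_shift, pvLastPos_cast1]
  rw [show ((1 : Nat) : Int) = ((0 : Nat) : Int) + 1 by norm_num]
  rw [pvCast_map_succ, pvStitch_shift]
  have hLp : pvLastPos' (S.map (· + 1)) 1 = pvLastPos' S 0 + 1 := by
    have h := pvLastPos'_shift S 0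
    norm_num at h; exact h
  rw [hLp]
  have hsliceL : PySem.List.slice (x :: y :: t)
      (some (((pvLastPos' S 0 + 1 : Nat) : Int) + 1)) none =
      PySem.List.slice t (some ((pvLastPos' S 0 : Nat) : Int)) none := by
    rw [show (((pvLastPos' S 0 + 1 : Nat) : Int) + 1) = (((pvLastPos' S 0 + 2 : Nat) : Int)) by
      push_cast; ring]
    rw [PySem.List.slice_from_natCast, PySem.List.slice_from_natCast]
    simp
  rw [hsliceL]
  rw [show (0 : Int) = ((0 : Nat) : Int) from rfl, pvLastPos_cast]
  simp

-- the selection after an initial merge is the tail selection shifted by two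
theorem pvSelN_after_merge (codes : List (Int × Int × Int)) (y : Int) (rest : List Int) :
    pvSelN 1 true (pvHits codes (y :: rest)) =
      (pvSelN 0 false (pvHits codes rest)).map (· + 2) := by
  cases rest with
  | nil => simp [pvHits_single, pvHits_nil, pvSelN]
  | cons z rest' =>
      rw [pvHits_cons]
      have hstep : pvSelN 1 true ((pvCodeGet codes y z).isSome :: pvHits codes (z :: rest')) =
          pvSelN 2 false (pvHits codes (z :: rest')) := by
        simp [pvSelN]
      have e1 : pvSelN 2 false (pvHits codes (z :: rest')) =
          (pvSelN 1 false (pvHits codes (z :: rest'))).map (· + 1) := by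
        have h := pvSelN_shift (pvHits codes (z :: rest')) 1 false
        norm_num at h; exact h
      have e0 : pvSelN 1 false (pvHits codes (z :: rest')) =
          (pvSelN 0 false (pvHits codes (z :: rest'))).map (· + 1) :=
        pvSelN_shift (pvHits codes (z :: rest')) 0 false
      rw [hstep, e1, e0]
      simp only [List.map_map]
      apply List.map_congr_left; intro a _
      simp only [Function.comp_apply]

-- main per-round lemma: selection + stitching computes the greedy pass
theorem pvPass_main (codes : List (Int × Int × Int)) (cur : List Int) :
    pvRebuild codes cur (pvCast (pvSelN 0 false (pvHits codes cur))) =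
        (pvPassSpec codes cur).1 ∧
      (pvSelN 0 false (pvHits codes cur) = [] ↔ (pvPassSpec codes cur).2 = false) := by
  induction cur using pvPassSpec.induct codes with
  | case1 =>
      constructor
      · simp [pvHits_nil, pvSelN, pvCast_nil, pvRebuild, pvPassSpec,
          PySem.List.slice_none_none]
      · simp [pvHits_nil, pvSelN, pvPassSpec]
  | case2 x =>
      constructor
      · simp [pvHits_single, pvSelN, pvCast_nil, pvRebuild, pvPassSpec,
          PySem.List.slice_none_none]
      · simp [pvHits_single, pvSelN, pvPassSpec]
  | case3 x y rest v hv ih =>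
      have hhits : pvHits codes (x :: y :: rest) = true :: pvHits codes (y :: rest) := by
        rw [pvHits_cons, hv]; rfl
      have hsel : pvSelN 0 false (pvHits codes (x :: y :: rest)) =
          0 :: (pvSelN 0 false (pvHits codes rest)).map (· + 2) := by
        rw [hhits]
        have h1 : pvSelN 0 false (true :: pvHits codes (y :: rest)) =
            0 :: pvSelN 1 true (pvHits codes (y :: rest)) := by
          simp [pvSelN]
        rw [h1, pvSelN_after_merge]
      constructor
      · rw [hsel, pvCast_cons]
        have h0 : ((0 : Nat) : Int) = (0 : Int) := rfl
        rw [h0, pvRebuild_merge0 codes x y rest v hv]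
        rw [ih.1]
        simp [pvPassSpec, hv]
      · rw [hsel]
        simp [pvPassSpec, hv]
  | case4 x y rest hv ih =>
      have hhits : pvHits codes (x :: y :: rest) = false :: pvHits codes (y :: rest) := by
        rw [pvHits_cons, hv]; rfl
      have hsel : pvSelN 0 false (pvHits codes (x :: y :: rest)) =
          (pvSelN 0 false (pvHits codes (y :: rest))).map (· + 1) := by
        rw [hhits]
        have h1 : pvSelN 0 false (false :: pvHits codes (y :: rest)) =
            pvSelN 1 false (pvHits codes (y :: rest)) := by
          simp [pvSelN]
        have h2 := pvSelN_shift (pvHits codes (y :: rest)) 0 false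
        norm_num at h2
        rw [h1, h2]
      constructor
      · rw [hsel, pvCast_map_succ, pvRebuild_shift, ih.1]
        simp [pvPassSpec, hv]
      · rw [hsel]
        simp only [List.map_eq_nil_iff, pvPassSpec, hv]
        exact ih.2

theorem pvLoop_eq (codes : List (Int × Int × Int)) (f : Nat) : ∀ (cur : List Int),
    pvLoopA codes f cur = pvLoopB codes f cur := by
  induction f with
  | zero => intro cur; rfl
  | succ f ih =>
      intro cur
      have hA := pvPassA_eq_spec codes cur 0 [] false
      simp only [List.drop_zero, List.nil_append, Bool.false_or] at hA
      have hsel : pvSel codes cur = pvCast (pvSelN 0 false (pvHits codes cur)) := by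
        have h := pvSel_fold (pvHits codes cur) 0 (-1) []
        simp only [Nat.cast_zero] at h
        simpa [pvSel] using h
      obtain ⟨hreb, hflag⟩ := pvPass_main codes cur
      unfold pvLoopA pvLoopB
      rw [hA, hsel]
      by_cases hs : pvSelN 0 false (pvHits codes cur) = []
      · have h2 : (pvPassSpec codes cur).2 = false := hflag.mp hs
        simp [hs, h2, pvCast_nil, pvPassSpec_fix codes cur h2]
      · have h2 : (pvPassSpec codes cur).2 = true := by
          rcases Bool.eq_false_or_eq_true (pvPassSpec codes cur).2 with h | h
          · exact h
          · exact absurd (hflag.mpr h) hs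
        have hne : (pvCast (pvSelN 0 false (pvHits codes cur))).isEmpty = false := by
          cases hsl : pvSelN 0 false (pvHits codes cur) with
          | nil => exact absurd hsl hs
          | cons a l => simp [pvCast]
        simp only [h2, if_true, hne, Bool.false_eq_true, if_false]
        rw [hreb]
        exact ih _

-- ===== VERDICT (by name: the statement is the Claim_ definition above) =====
theorem bpe_encode_spec : Claim_equal_bpe_encode := by
  intro seq codes _
  unfold Spec_bpe_encode bpe_encode bpe_encode_alt
  exact pvLoop_eq codes (seq.length + 1) seq
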